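-- pv_equiv track=rewrite | github.com/jiselectric/algorithm_programmers | stock.py | solution
-- ===== SOURCE A (Python) =====
-- from collections import deque
--
-- def solution(prices):
--     answer = []
--     prices = deque(prices)
--
--     while prices:
--         pop = prices.popleft()
--         time = 0
--
--         for i in prices:
--             if pop <= i: # 1 -> 2 // 2 -> 3
--                 time = time + 1
--             else:
--                 time = time + 1
--                 break
--         answer.append(time)
--
--     return answer
-- ===== SOURCE B (Python) =====
-- def solution(prices):
--     n = len(prices)
--     answer = [0] * n
--     stack = []  # indices of a right-to-left monotonic stack (prices strictly increase toward the bottom)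
--     for i in range(n - 1, -1, -1):
--         while stack and prices[stack[-1]] >= prices[i]:
--             stack.pop()
--         answer[i] = (stack[-1] - i) if stack else (n - 1 - i)
--         stack.append(i)
--     return answer
-- ===== Notes on version B (the rewrite author's own statement) =====
-- stated objective: faster
-- what changed: Replaced the per-element rescans of the remaining deque with a single right-to-left pass maintaining a monotonic stack of next-smaller candidates.
import Mathlib
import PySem

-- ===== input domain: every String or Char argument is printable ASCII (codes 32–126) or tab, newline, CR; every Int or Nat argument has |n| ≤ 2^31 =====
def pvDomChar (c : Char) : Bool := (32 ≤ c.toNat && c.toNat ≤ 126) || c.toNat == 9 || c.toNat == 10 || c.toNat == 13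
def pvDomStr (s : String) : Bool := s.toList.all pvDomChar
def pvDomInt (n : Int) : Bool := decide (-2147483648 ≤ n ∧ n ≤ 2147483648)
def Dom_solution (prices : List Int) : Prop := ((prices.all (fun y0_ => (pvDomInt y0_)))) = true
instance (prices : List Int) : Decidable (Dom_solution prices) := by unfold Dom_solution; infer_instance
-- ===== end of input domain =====

-- B replaces A's quadratic rescans of the remaining deque with one right-to-left pass over the
-- indices maintaining a monotonic stack of next-smaller candidates (objective: faster).

-- ===== PORT A =====
-- inner 'for i in prices' loop of A: time counts elements up to and including the first strict drop
def countA (pop : Int) (rest : List Int) : Int :=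
  match rest with
  | [] => 0
  | i :: is => if pop ≤ i then 1 + countA pop is else 1

-- outer 'while prices' loop: popleft, run the inner count on the remaining deque
def aLoop (dq : List Int) : List Int :=
  match dq with
  | [] => []
  | pop :: rest => countA pop rest :: aLoop rest

def solution (prices : List Int) : List Int := aLoop prices

-- ===== PORT B =====
-- 'while stack and prices[stack[-1]] >= prices[i]: stack.pop()'
-- (every index pushed on the stack is in range, so getD is exact here)
def popGE (prices : List Int) (p : Int) (stack : List Nat) : List Nat :=
  match stack with
  | [] => []
  | k :: rest => if p ≤ prices.getD k 0 then popGE prices p rest else k :: rest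

-- 'for i in range(n-1, -1, -1)': the counter counts down; since answer[i] is produced at step i,
-- the answer list is built by consing in front
def bLoop (prices : List Int) (n : Nat) : Nat → List Nat → List Int → List Int
  | 0, _, ans => ans
  | i+1, stack, ans =>
    let p := prices.getD i 0
    let st := popGE prices p stack
    let a : Int := match st with
      | [] => (n : Int) - 1 - (i : Int)
      | k :: _ => (k : Int) - (i : Int)
    bLoop prices n i (i :: st) (a :: ans)

def solution_alt (prices : List Int) : List Int :=
  bLoop prices prices.length prices.length [] []

-- ===== PRECONDITION & SPEC =====
def Spec_solution (prices : List Int) (out : List Int) : Prop := out = solution_alt prices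
instance (prices : List Int) (out : List Int) : Decidable (Spec_solution prices out) := by unfold Spec_solution; infer_instance

-- ===== CLAIM (what is proved, stated in full; the proofs are below) =====
def Claim_equal_solution : Prop := ∀ (prices : List Int), Dom_solution prices → Spec_solution prices (solution prices)

-- ===== LEMMAS AND PROOFS =====

-- the common specification: entry j of the answer is countA of price j over the suffix after j
def specF (prices : List Int) (j : Nat) : Int :=
  countA (prices.getD j 0) (prices.drop (j + 1))

-- A computes specF
theorem aLoop_eq (l : List Int) :
    aLoop l = (List.range l.length).map (specF l) := by
  induction l with
  | nil => rfl
  | cons p rest ih =>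
    simp only [aLoop, List.length_cons, List.range_succ_eq_map, List.map_cons, List.map_map]
    refine List.cons_eq_cons.mpr ⟨by simp [specF], ?_⟩
    rw [ih]
    apply List.map_congr_left
    intro j _
    simp [specF, Function.comp]

-- getD through drop
theorem getD_drop (l : List Int) (m j : Nat) (d : Int) :
    (l.drop m).getD j d = l.getD (m + j) d := by
  induction m generalizing l with
  | zero => simp
  | succ m ih =>
    cases l with
    | nil => simp
    | cons x xs => rw [List.drop_succ_cons, ih xs, Nat.add_right_comm, List.getD_cons_succ]

-- countA when nothing drops: the whole suffix is counted
theorem countA_all (p : Int) (l : List Int) (h : ∀ x ∈ l, p ≤ x) :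
    countA p l = (l.length : Int) := by
  induction l with
  | nil => rfl
  | cons x xs ih =>
    have hx : p ≤ x := h x (by simp)
    simp only [countA, if_pos hx, ih (fun y hy => h y (by simp [hy])), List.length_cons]
    push_cast; ring

-- countA when the first strict drop is at relative index r
theorem countA_first (p : Int) (l : List Int) (r : Nat)
    (hr : r < l.length) (hdrop : l.getD r 0 < p)
    (hbefore : ∀ m, m < r → p ≤ l.getD m 0) :
    countA p l = (r : Int) + 1 := by
  induction l generalizing r with
  | nil => simp at hr
  | cons x xs ih =>
    cases r with
    | zero =>
      simp only [List.getD_cons_zero] at hdrop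
      simp [countA, not_le.mpr hdrop]
    | succ r =>
      have hx : p ≤ x := by simpa using hbefore 0 (Nat.succ_pos r)
      have : countA p xs = (r : Int) + 1 := by
        apply ih r (by simpa using hr) (by simpa using hdrop)
        intro m hm
        simpa using hbefore (m + 1) (by omega)
      simp only [countA, if_pos hx, this]
      push_cast; ring

-- the invariant of B's right-to-left loop, for the suffix of indices ≥ i
def StackInv (prices : List Int) (i : Nat) (stack : List Nat) : Prop :=
  List.Pairwise (fun a b => a < b ∧ prices.getD b 0 < prices.getD a 0) stack ∧
  (∀ k ∈ stack, i ≤ k ∧ k < prices.length) ∧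
  (∀ k ∈ stack, ∀ m, i ≤ m → m < k → prices.getD k 0 < prices.getD m 0) ∧
  (∀ j, i ≤ j → j < prices.length →
     (∀ m, i ≤ m → m < j → prices.getD j 0 < prices.getD m 0) → j ∈ stack)

-- under the monotonicity of the stack, popping is filtering
theorem popGE_eq_filter (prices : List Int) (p : Int) (stack : List Nat)
    (hpw : List.Pairwise (fun a b => a < b ∧ prices.getD b 0 < prices.getD a 0) stack) :
    popGE prices p stack = stack.filter (fun k => decide (prices.getD k 0 < p)) := by
  induction stack with
  | nil => rfl
  | cons k rest ih =>
    rcases List.pairwise_cons.mp hpw with ⟨hk, hrest⟩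
    by_cases h : p ≤ prices.getD k 0
    · simp only [popGE, if_pos h]
      rw [List.filter_cons_of_neg (by simp only [decide_eq_true_eq]; exact not_lt.mpr h)]
      exact ih hrest
    · simp only [popGE, if_neg h]
      rw [List.filter_cons_of_pos (by simp only [decide_eq_true_eq]; exact not_le.mp h)]
      congr 1
      symm
      apply List.filter_eq_self.mpr
      intro b hb
      have := (hk b hb).2
      simp only [decide_eq_true_eq]
      exact lt_trans this (not_le.mp h)

-- the first strict drop after i is on the stack (found via minimality)
theorem first_drop_mem (prices : List Int) (i : Nat) (stack : List Nat)
    (hinv : StackInv prices (i + 1) stack) (j : Nat)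
    (hij : i + 1 ≤ j) (hjn : j < prices.length)
    (hj : prices.getD j 0 < prices.getD i 0) :
    ∃ j0, j0 ∈ stack ∧ j0 ≤ j ∧ prices.getD j0 0 < prices.getD i 0 := by
  obtain ⟨hpw, hbd, hrec, hcomp⟩ := hinv
  classical
  have hQ : ∃ m, i + 1 ≤ m ∧ m < prices.length ∧ prices.getD m 0 < prices.getD i 0 :=
    ⟨j, hij, hjn, hj⟩
  let Q : Nat → Prop := fun m => i + 1 ≤ m ∧ m < prices.length ∧ prices.getD m 0 < prices.getD i 0
  have hex : ∃ m, Q m := hQ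
  let j0 := Nat.find hex
  have hQ0 : Q j0 := Nat.find_spec hex
  have hmin : ∀ m, m < j0 → ¬ Q m := fun m hm => Nat.find_min hex hm
  have hj0le : j0 ≤ j := Nat.find_min' hex ⟨hij, hjn, hj⟩
  refine ⟨j0, ?_, hj0le, hQ0.2.2⟩
  apply hcomp j0 hQ0.1 hQ0.2.1
  intro m hm hmj
  have hmn : m < prices.length := lt_trans hmj hQ0.2.1
  have := hmin m hmj
  have hge : prices.getD i 0 ≤ prices.getD m 0 := by
    by_contra hlt
    exact this ⟨hm, hmn, not_le.mp hlt⟩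
  exact lt_of_lt_of_le hQ0.2.2 hge

-- one step of B's loop: the invariant is preserved and the produced value is specF i
theorem step_lemma (prices : List Int) (i : Nat) (stack : List Nat)
    (hin : i < prices.length) (hinv : StackInv prices (i + 1) stack) :
    StackInv prices i (i :: popGE prices (prices.getD i 0) stack) ∧
    (match popGE prices (prices.getD i 0) stack with
      | [] => (prices.length : Int) - 1 - (i : Int)
      | k :: _ => (k : Int) - (i : Int)) = specF prices i := by
  obtain ⟨hpw, hbd, hrec, hcomp⟩ := hinv
  set p := prices.getD i 0 with hp
  have hfil : popGE prices p stack = stack.filter (fun k => decide (prices.getD k 0 < p)) :=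
    popGE_eq_filter prices p stack hpw
  have hsub : ∀ k ∈ popGE prices p stack, k ∈ stack := by
    intro k hk; rw [hfil] at hk; exact (List.mem_filter.mp hk).1
  have hlt : ∀ k ∈ popGE prices p stack, prices.getD k 0 < p := by
    intro k hk; rw [hfil] at hk
    simpa using (List.mem_filter.mp hk).2
  have hmemst : ∀ k, k ∈ stack → prices.getD k 0 < p → k ∈ popGE prices p stack := by
    intro k hk hkp
    rw [hfil]; exact List.mem_filter.mpr ⟨hk, by simpa using hkp⟩
  have hpwst : List.Pairwise (fun a b => a < b ∧ prices.getD b 0 < prices.getD a 0)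
      (popGE prices p stack) := by
    rw [hfil]; exact hpw.sublist List.filter_sublist
  have hinv' : StackInv prices i (i :: popGE prices p stack) := by
    refine ⟨?_, ?_, ?_, ?_⟩
    · rw [List.pairwise_cons]
      constructor
      · intro b hb
        exact ⟨by have := (hbd b (hsub b hb)).1; omega, hlt b hb⟩
      · exact hpwst
    · intro k hk
      rcases List.mem_cons.mp hk with rfl | hk'
      · exact ⟨le_refl _, hin⟩
      · have := hbd k (hsub k hk'); omega
    · intro k hk m him hmk
      rcases List.mem_cons.mp hk with rfl | hk'
      · omega
      · rcases Nat.eq_or_lt_of_le him with rfl | him'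
        · exact hlt k hk'
        · exact hrec k (hsub k hk') m him' hmk
    · intro j hij hjn hj
      rcases Nat.eq_or_lt_of_le hij with rfl | hij'
      · exact List.mem_cons_self
      · apply List.mem_cons_of_mem
        apply hmemst
        · exact hcomp j hij' hjn (fun m hm hmj => hj m (by omega) hmj)
        · exact hj i (le_refl _) hij'
  refine ⟨hinv', ?_⟩
  unfold specF
  rw [← hp]
  cases hmatch : popGE prices p stack with
  | nil =>
    -- no drop in the suffix: every later price is ≥ p
    have hall : ∀ x ∈ prices.drop (i + 1), p ≤ x := by
      intro x hx
      by_contra hxlt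
      obtain ⟨r, hr, hxr⟩ := List.mem_iff_getElem.mp hx
      have hrlen : (prices.drop (i + 1)).length = prices.length - (i + 1) :=
        List.length_drop ..
      have hjn : i + 1 + r < prices.length := by omega
      have hjd : prices.getD (i + 1 + r) 0 < p := by
        have : (prices.drop (i + 1)).getD r 0 = x := by
          rw [List.getD_eq_getElem _ _ hr]; exact hxr
        rw [getD_drop] at this
        rw [this]; exact not_le.mp hxlt
      obtain ⟨j0, hj0mem, _, hj0lt⟩ :=
        first_drop_mem prices i stack ⟨hpw, hbd, hrec, hcomp⟩ (i + 1 + r)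
          (by omega) hjn hjd
      have hmem : j0 ∈ popGE prices p stack := hmemst j0 hj0mem hj0lt
      rw [hmatch] at hmem
      simp at hmem
    rw [countA_all p _ hall, List.length_drop]
    have h1 : i + 1 ≤ prices.length := hin
    push_cast [Nat.cast_sub h1]
    ring
  | cons k tl =>
    have hkst : k ∈ popGE prices p stack := by rw [hmatch]; simp
    have hkstack := hsub k hkst
    have hkp : prices.getD k 0 < p := hlt k hkst
    have hkbd := hbd k hkstack
    -- every index strictly between i and k has price ≥ p
    have hbefore : ∀ m, i + 1 ≤ m → m < k → p ≤ prices.getD m 0 := by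
      intro m him hmk
      by_contra hmlt
      have hmn : m < prices.length := lt_trans hmk hkbd.2
      obtain ⟨j0, hj0mem, hj0le, hj0lt⟩ :=
        first_drop_mem prices i stack ⟨hpw, hbd, hrec, hcomp⟩ m him hmn (not_le.mp hmlt)
      have hj0st : j0 ∈ popGE prices p stack := hmemst j0 hj0mem hj0lt
      rw [hmatch] at hj0st
      -- the popped stack is sorted by index with k first, so k ≤ j0; but j0 ≤ m < k
      rcases List.mem_cons.mp hj0st with rfl | hj0tl
      · omega
      · rw [hmatch] at hpwst
        have := (List.pairwise_cons.mp hpwst).1 j0 hj0tl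
        omega
    have hr : k - (i + 1) < (prices.drop (i + 1)).length := by
      rw [List.length_drop]; omega
    have hcnt := countA_first p (prices.drop (i + 1)) (k - (i + 1)) hr
      (by rw [getD_drop]
          have h2 : i + 1 + (k - (i + 1)) = k := by omega
          rw [h2]; exact hkp)
      (by intro m hm
          rw [getD_drop]
          exact hbefore (i + 1 + m) (by omega) (by omega))
    rw [hcnt]
    have hik : i + 1 ≤ k := hkbd.1
    push_cast [Nat.cast_sub hik]
    ring

-- the whole of B's loop computes specF on the processed range
theorem bLoop_eq (prices : List Int) : ∀ (i : Nat) (stack : List Nat) (ans : List Int),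
    i ≤ prices.length → StackInv prices i stack →
    bLoop prices prices.length i stack ans
      = (List.range i).map (specF prices) ++ ans := by
  intro i
  induction i with
  | zero => intro stack ans _ _; simp [bLoop]
  | succ i ih =>
    intro stack ans hi hinv
    have hin : i < prices.length := hi
    obtain ⟨hinv', hval⟩ := step_lemma prices i stack hin hinv
    simp only [bLoop]
    rw [ih _ _ (by omega) hinv', hval, List.range_succ]
    simp

-- ===== VERDICT (by name: the statement is the Claim_ definition above) =====
theorem solution_spec : Claim_equal_solution := by
  intro prices _
  unfold Spec_solution solution solution_alt
  have hinv : StackInv prices prices.length [] := by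
    refine ⟨List.Pairwise.nil, ?_, ?_, ?_⟩
    · intro k hk; simp at hk
    · intro k hk; simp at hk
    · intro j h1 h2 _; omega
  rw [aLoop_eq, bLoop_eq prices prices.length [] [] (le_refl _) hinv]
  simp
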